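-- pv_equiv track=rewrite | github.com/shrads-4/Comp-Proj | quizScreen.py | splitQ
-- ===== SOURCE A (Python) =====
-- def splitQ(que):
--     L = que.split()
--     chunks = [L[i:i+8] for i in range(0, len(L), 8)]
--     que = [None]*len(chunks)
--     i=0
--     for l in chunks:
--         que[i] = ' '.join(l)
--         i+=1
--     return que
-- ===== SOURCE B (Python) =====
-- def splitQ(que):
--     res = []
--     group = []
--     for w in que.split():
--         group.append(w)
--         if len(group) == 8:
--             res.append(' '.join(group))
--             group = []
--     if group:
--         res.append(' '.join(group))
--     return res
-- ===== Notes on version B (the rewrite author's own statement) =====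
-- stated objective: simpler
-- what changed: Replaces the slice-based chunk comprehension plus a preallocated None list filled by an indexed loop with a single pass over the words that accumulates a current group and flushes it every 8 words (and once at the end if non-empty).
import Mathlib
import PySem

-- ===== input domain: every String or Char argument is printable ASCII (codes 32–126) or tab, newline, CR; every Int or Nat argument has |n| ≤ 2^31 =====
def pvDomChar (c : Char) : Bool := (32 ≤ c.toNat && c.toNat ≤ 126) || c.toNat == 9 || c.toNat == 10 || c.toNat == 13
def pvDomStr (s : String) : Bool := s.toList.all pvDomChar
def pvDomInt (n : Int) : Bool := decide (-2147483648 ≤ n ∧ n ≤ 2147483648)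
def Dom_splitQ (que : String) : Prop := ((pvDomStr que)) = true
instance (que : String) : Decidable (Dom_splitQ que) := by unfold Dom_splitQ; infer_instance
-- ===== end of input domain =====

-- B replaces A's slice-comprehension + preallocated indexed fill with one pass over the
-- words that flushes a running 8-word group (objective: simpler).


-- ===== PORT A =====
-- `que[i] = …` always hits an index < len(que) here (i runs 0..len(chunks)-1 and
-- len(que) = len(chunks)), so List.set is exact; the final map removes the Option
-- layer of the `[None]*len(chunks)` preallocation (every slot has been assigned).
def splitQ (que : String) : List String :=
  let L := PySem.Str.split₀ que
  let chunks := (PySem.List.pyRange 0 (L.length : Int) 8).map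
    (fun i => PySem.List.slice L (some i) (some (i + 8)))
  let que0 : List (Option String) := List.replicate chunks.length none
  let res := chunks.foldl
    (fun (st : List (Option String) × Nat) l =>
      (st.1.set st.2 (some (PySem.Str.join " " l)), st.2 + 1))
    (que0, 0)
  res.1.map (fun o => o.getD "")

-- ===== PORT B =====
-- one iteration of B's loop body: append the word to the group, flush at size 8
def splitQStep (st : List String × List String) (w : String) : List String × List String :=
  let g := st.2 ++ [w]
  if g.length == 8 then (st.1 ++ [PySem.Str.join " " g], ([] : List String)) else (st.1, g)

def splitQ_alt (que : String) : List String :=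
  let st := (PySem.Str.split₀ que).foldl splitQStep ([], [])
  if st.2.isEmpty then st.1 else st.1 ++ [PySem.Str.join " " st.2]

-- ===== PRECONDITION & SPEC =====
def Spec_splitQ (que : String) (out : List String) : Prop := out = splitQ_alt que
instance (que : String) (out : List String) : Decidable (Spec_splitQ que out) := by unfold Spec_splitQ; infer_instance

-- ===== CLAIM (what is proved, stated in full; the proofs are below) =====
def Claim_equal_splitQ : Prop := ∀ (que : String), Dom_splitQ que → Spec_splitQ que (splitQ que)

-- ===== LEMMAS AND PROOFS =====

-- the common specification both ports compute: join each 8-word block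
def chunk8 : List String → List String
  | [] => []
  | w :: L => PySem.Str.join " " (w :: List.take 7 L) :: chunk8 (List.drop 7 L)
termination_by L => L.length
decreasing_by simp

theorem chunk8_nil : chunk8 [] = [] := by unfold chunk8; rfl

theorem chunk8_cons (w : String) (L : List String) :
    chunk8 (w :: L) = PySem.Str.join " " (w :: List.take 7 L) :: chunk8 (List.drop 7 L) := by
  conv_lhs => unfold chunk8

theorem chunk8_short {g : List String} (hne : g ≠ []) (hg : g.length < 8) :
    chunk8 g = [PySem.Str.join " " g] := by
  match g, hne with
  | w :: g', _ =>
    rw [chunk8_cons,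
        List.take_of_length_le (by simp at hg; omega),
        List.drop_eq_nil_of_le (by simp at hg; omega), chunk8_nil]

-- B's loop with invariant state (acc, g), |g| < 8, finishes to acc ++ chunk8 (g ++ L)
theorem bLoop (L : List String) : ∀ (acc g : List String), g.length < 8 →
    (let st := L.foldl splitQStep (acc, g);
     if st.2.isEmpty then st.1 else st.1 ++ [PySem.Str.join " " st.2])
    = acc ++ chunk8 (g ++ L) := by
  induction L with
  | nil =>
    intro acc g hg
    simp only [List.foldl_nil, List.append_nil]
    cases hge : g with
    | nil => simp [chunk8_nil]
    | cons w g' => rw [← hge, chunk8_short (by simp [hge]) hg]; simp [hge]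
  | cons w L ih =>
    intro acc g hg
    simp only [List.foldl_cons]
    by_cases h8 : (g ++ [w]).length = 8
    · have hstep : splitQStep (acc, g) w
          = (acc ++ [PySem.Str.join " " (g ++ [w])], ([] : List String)) := by
        simp [splitQStep, h8]
      rw [hstep, ih _ [] (by simp)]
      have hg7 : g.length = 7 := by simp at h8; omega
      cases hge : g with
      | nil => rw [hge] at hg7; simp at hg7
      | cons x g'' =>
        have hg6 : g''.length = 6 := by rw [hge] at hg7; simp at hg7; omega
        rw [show (x :: g'') ++ w :: L = x :: (g'' ++ w :: L) from by simp, chunk8_cons]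
        rw [List.take_append, List.take_of_length_le (by omega), hg6,
            List.drop_append, List.drop_eq_nil_of_le (by omega), hg6]
        simp
    · have hg7 : g.length ≠ 7 := fun h => h8 (by simp [h])
      have hstep : splitQStep (acc, g) w = (acc, g ++ [w]) := by
        simp [splitQStep, hg7]
      rw [hstep, ih _ (g ++ [w]) (by simp; omega)]
      simp

theorem splitQ_alt_eq (que : String) :
    splitQ_alt que = chunk8 (PySem.Str.split₀ que) := by
  have := bLoop (PySem.Str.split₀ que) [] [] (by simp)
  simpa [splitQ_alt] using this

-- A's fill loop writes the joined chunks into the preallocated list slot by slot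
theorem fillLoop (cs : List (List String)) : ∀ (p : List (Option String)),
    (cs.foldl
      (fun (st : List (Option String) × Nat) l =>
        (st.1.set st.2 (some (PySem.Str.join " " l)), st.2 + 1))
      (p ++ List.replicate cs.length none, p.length)).1
    = p ++ cs.map (fun l => some (PySem.Str.join " " l)) := by
  induction cs with
  | nil => intro p; simp
  | cons c cs ih =>
    intro p
    simp only [List.foldl_cons, List.length_cons, List.replicate_succ]
    rw [List.set_append, if_neg (by omega), Nat.sub_self, List.set_cons_zero]
    have := ih (p ++ [some (PySem.Str.join " " c)])
    simp only [List.length_append, List.length_cons, List.length_nil, List.append_assoc,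
      List.cons_append, List.nil_append] at this ⊢
    rw [show p.length + 1 = p.length + 0 + 1 from by omega] at this
    exact this

-- the chunk comprehension (as natural-number slices), joined, is chunk8
theorem rangeChunk (L : List String) :
    (List.range ((L.length + 7) / 8)).map
      (fun k => PySem.Str.join " " (List.take 8 (List.drop (8 * k) L))) = chunk8 L := by
  generalize hn : L.length = n
  induction n using Nat.strong_induction_on generalizing L with
  | _ n ih =>
    cases L with
    | nil =>
      simp at hn; subst hn; simp [chunk8_nil]
    | cons w L' =>
      have hnpos : 0 < n := by simp at hn; omega
      have hsplit : (n + 7) / 8 = (n - 8 + 7) / 8 + 1 := by omega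
      rw [hsplit, List.range_succ_eq_map, List.map_cons, List.map_map, chunk8_cons]
      have hdlen : (List.drop 7 L').length = n - 8 := by simp at hn ⊢; omega
      refine congrArg₂ List.cons ?_ ?_
      · show PySem.Str.join " " (List.take 8 (List.drop (8 * 0) (w :: L'))) = _
        rw [Nat.mul_zero, List.drop_zero]
        rfl
      · rw [← ih (n - 8) (by omega) (List.drop 7 L') hdlen]
        apply List.map_congr_left
        intro k _
        simp only [Function.comp]
        congr 2
        rw [List.drop_drop]
        rw [show 8 * Nat.succ k = (8 * k + 7) + 1 from by omega, List.drop_succ_cons]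
        congr 1
        omega

-- splitQ with its let-bindings expanded (definitional)
theorem splitQ_eq (que : String) :
    splitQ que =
      (((PySem.List.pyRange 0 ((PySem.Str.split₀ que).length : Int) 8).map
        (fun i => PySem.List.slice (PySem.Str.split₀ que) (some i) (some (i + 8)))).foldl
        (fun (st : List (Option String) × Nat) l =>
          (st.1.set st.2 (some (PySem.Str.join " " l)), st.2 + 1))
        (List.replicate ((PySem.List.pyRange 0 ((PySem.Str.split₀ que).length : Int) 8).map
          (fun i => PySem.List.slice (PySem.Str.split₀ que) (some i) (some (i + 8)))).length none, 0)).1.map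
        (fun o => o.getD "") := rfl

-- ===== VERDICT (by name: the statement is the Claim_ definition above) =====
theorem splitQ_spec : Claim_equal_splitQ := by
  intro que _
  unfold Spec_splitQ
  rw [splitQ_eq, splitQ_alt_eq]
  set L := PySem.Str.split₀ que with hL
  have hrange : PySem.List.pyRange 0 (L.length : Int) 8
      = (List.range ((L.length + 7) / 8)).map (fun k => ((8 * k : Nat) : Int)) := by
    rw [PySem.List.pyRange_of_pos _ _ (by norm_num : (0:Int) < 8)]
    rcases Nat.eq_zero_or_pos L.length with h0 | hpos
    · simp [h0]
    · have hlt : (0:Int) < (L.length : Int) := by exact_mod_cast hpos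
      rw [if_pos hlt]
      have hc : ((L.length : Int) - 0 + 8 - 1) / 8 = ((L.length + 7 : Nat) : Int) / ((8 : Nat) : Int) := by
        push_cast; ring_nf
      rw [hc, ← Int.natCast_div, Int.toNat_natCast]
      apply List.map_congr_left
      intro k _
      push_cast; ring
  have hchunks : (((PySem.List.pyRange 0 (L.length : Int) 8).map
        (fun i => PySem.List.slice L (some i) (some (i + 8)))).map (PySem.Str.join " "))
      = chunk8 L := by
    rw [hrange, List.map_map, List.map_map, ← rangeChunk L]
    apply List.map_congr_left
    intro k _
    simp only [Function.comp]
    congr 1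
    rw [show ((8 * k : Nat) : Int) + 8 = ((8 * k : Nat) : Int) + ((8 : Nat) : Int) from by norm_num]
    exact PySem.List.slice_natCast_add L (8 * k) 8
  set cs := (PySem.List.pyRange 0 (L.length : Int) 8).map
      (fun i => PySem.List.slice L (some i) (some (i + 8))) with hcs
  have hfill := fillLoop cs []
  simp only [List.nil_append, List.length_nil] at hfill
  rw [hfill]
  rw [← hchunks, List.map_map]
  apply List.map_congr_left
  intro l _
  rfl
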